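-- pv_equiv track=rewrite | github.com/costantin0/mc-more-accurate-recipe-book | more_accurate_recipe_book_1_19_4/data/minecraft/advancements/convert_recipes.py | merge_fungible_ingredients
-- ===== SOURCE A (Python) =====
-- def merge_fungible_ingredients(ingredients_list):
--     ingredients_by_symbol = {}
--     resulting_list = []
--     for type, item, symbol in ingredients_list:
--         #if two items have the same symbol in the recipe (for example "#") they will be put together as fungible
--         if symbol in ingredients_by_symbol:
--             ingredients_by_symbol[symbol][1].append(item)
--         else:
--             ingredients_by_symbol[symbol] = [type, [item]]
--     for values in ingredients_by_symbol.values():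
--         #the items are finally taken out from the dictionary and put inside a list:
--         resulting_list.append([values[0], values[1]])
--     return resulting_list
-- ===== SOURCE B (Python) =====
-- def merge_fungible_ingredients(ingredients_list):
--     # collect distinct symbols in order of first appearance, then scan per symbol
--     symbols = []
--     for _, _, symbol in ingredients_list:
--         if symbol not in symbols:
--             symbols.append(symbol)
--     return [[next(t for t, _, s in ingredients_list if s == symbol),
--              [item for _, item, s in ingredients_list if s == symbol]]
--             for symbol in symbols]
-- ===== Notes on version B (the rewrite author's own statement) =====
-- stated objective: alternative
-- what changed: Replaces the single-pass dict grouping with a collect-distinct-symbols pass followed by a per-symbol rescan of the input (first-match type, filtered items), trading O(n) for O(n*k) with no dictionary.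
import Mathlib
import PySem

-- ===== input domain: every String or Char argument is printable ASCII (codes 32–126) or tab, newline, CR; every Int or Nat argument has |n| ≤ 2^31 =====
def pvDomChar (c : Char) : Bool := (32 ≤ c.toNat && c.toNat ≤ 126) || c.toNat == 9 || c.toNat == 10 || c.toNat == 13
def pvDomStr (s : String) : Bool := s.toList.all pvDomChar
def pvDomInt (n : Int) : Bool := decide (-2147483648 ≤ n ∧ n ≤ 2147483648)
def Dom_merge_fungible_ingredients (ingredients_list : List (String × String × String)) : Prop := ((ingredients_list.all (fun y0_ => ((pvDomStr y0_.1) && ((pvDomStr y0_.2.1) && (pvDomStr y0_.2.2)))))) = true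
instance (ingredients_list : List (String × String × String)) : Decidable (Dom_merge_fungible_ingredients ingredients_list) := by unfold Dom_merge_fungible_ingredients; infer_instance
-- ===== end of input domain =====

-- B replaces the single-pass dict grouping by a collect-distinct-symbols pass followed by a
-- per-symbol rescan of the input (alternative decomposition, not faster).


-- ===== PORT A =====
-- one loop iteration of A: group into the dict keyed by symbol
def pvStepA (d : PySem.Dict String (String × List String)) (x : String × String × String) :
    PySem.Dict String (String × List String) :=
  if d.contains x.2.2 then
    d.modify x.2.2 ("", []) (fun v => (v.1, v.2 ++ [x.2.1]))
  else
    d.insert x.2.2 (x.1, [x.2.1])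

def merge_fungible_ingredients (ingredients_list : List (String × String × String)) : List (String × List String) :=
  let ingredients_by_symbol := ingredients_list.foldl pvStepA PySem.Dict.empty
  ingredients_by_symbol.values.foldl (fun acc v => acc ++ [(v.1, v.2)]) []

-- ===== PORT B =====
def merge_fungible_ingredients_alt (ingredients_list : List (String × String × String)) : List (String × List String) :=
  let symbols := ingredients_list.foldl (fun acc x => PySem.Set.add acc x.2.2) ([] : PySem.Set String)
  symbols.map (fun symbol =>
    ((match ingredients_list.find? (fun x => x.2.2 == symbol) with
      | some x => x.1
      | none => ""),   -- unreachable: every symbol comes from the list (Python's next never raises here)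
     (ingredients_list.filter (fun x => x.2.2 == symbol)).map (fun x => x.2.1)))

-- ===== PRECONDITION & SPEC =====
def Spec_merge_fungible_ingredients (ingredients_list : List (String × String × String)) (out : List (String × List String)) : Prop := out = merge_fungible_ingredients_alt ingredients_list
instance (ingredients_list : List (String × String × String)) (out : List (String × List String)) : Decidable (Spec_merge_fungible_ingredients ingredients_list out) := by unfold Spec_merge_fungible_ingredients; infer_instance

-- ===== CLAIM (what is proved, stated in full; the proofs are below) =====
def Claim_equal_merge_fungible_ingredients : Prop := ∀ (ingredients_list : List (String × String × String)), Dom_merge_fungible_ingredients ingredients_list → Spec_merge_fungible_ingredients ingredients_list (merge_fungible_ingredients ingredients_list)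

-- ===== LEMMAS AND PROOFS =====

-- keys of A's dict after the loop: the distinct symbols in first-appearance order
lemma pvKeysF (l : List (String × String × String)) (d : PySem.Dict String (String × List String)) :
    (l.foldl pvStepA d).keys = PySem.Set.update d.keys (l.map (fun x => x.2.2)) := by
  induction l generalizing d with
  | nil => simp [PySem.Set.update_nil]
  | cons x t ih =>
    simp only [List.foldl_cons, List.map_cons, PySem.Set.update_cons, ih]
    congr 1
    unfold pvStepA
    split_ifs with h
    · rw [PySem.Dict.keys_modify, PySem.Dict.keys_insert_of_contains _ _ h]
      simp [PySem.Set.add, PySem.Dict.contains_iff_mem_keys d x.2.2 |>.mp h]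
    · rw [PySem.Dict.keys_insert_of_not_contains _ _ (by simpa using h)]
      have : x.2.2 ∉ d.keys := fun hm => by
        simp [(PySem.Dict.contains_iff_mem_keys d x.2.2).mpr hm] at h
      simp [PySem.Set.add, this]

-- value of A's dict at any key c after the loop
lemma pvGetDF (l : List (String × String × String)) (d : PySem.Dict String (String × List String)) (c : String) :
    (l.foldl pvStepA d).getD c ("", []) =
      (if d.contains c then
        ((d.getD c ("", [])).1,
         (d.getD c ("", [])).2 ++ (l.filter (fun x => x.2.2 == c)).map (fun x => x.2.1))
      else
        match l.find? (fun x => x.2.2 == c) with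
        | some x => (x.1, (l.filter (fun x => x.2.2 == c)).map (fun x => x.2.1))
        | none => ("", [])) := by
  induction l generalizing d with
  | nil =>
    by_cases h : d.contains c
    · simp [h]
    · simp [h, PySem.Dict.getD_of_not_contains d _ (Bool.not_eq_true _ ▸ h)]
  | cons x t ih =>
    simp only [List.foldl_cons]
    rw [ih]
    unfold pvStepA
    by_cases hx : x.2.2 = c
    · subst hx
      by_cases h : d.contains x.2.2
      · simp [h, PySem.Dict.contains_modify]
      · simp [h]
    · have hb : (x.2.2 == c) = false := by simp [hx]
      by_cases h : d.contains x.2.2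
      · simp [h, hb, PySem.Dict.contains_modify, PySem.Dict.getD_modify, Ne.symm hx]
      · simp [h, hb, PySem.Dict.contains_insert, PySem.Dict.getD_insert, Ne.symm hx]

-- ===== VERDICT (by name: the statement is the Claim_ definition above) =====
theorem merge_fungible_ingredients_spec : Claim_equal_merge_fungible_ingredients := by
  intro l _hdom
  unfold Spec_merge_fungible_ingredients merge_fungible_ingredients merge_fungible_ingredients_alt
  simp only []
  simp only [Prod.mk.eta]
  rw [PySem.List.foldl_append_singleton]
  have hkeys : (l.foldl pvStepA PySem.Dict.empty).keys
      = PySem.Set.update ([] : PySem.Set String) (l.map (fun x => x.2.2)) := by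
    simpa using pvKeysF l PySem.Dict.empty
  have hnd : (l.foldl pvStepA PySem.Dict.empty).keys.Nodup := by
    rw [hkeys]; exact PySem.Set.nodup_update _ _ List.nodup_nil
  rw [PySem.Dict.values_eq_map_keys _ hnd ("", []), hkeys,
      PySem.Set.update_map_eq_foldl_add l (fun x => x.2.2) ([] : PySem.Set String)]
  simp only [List.nil_append]
  rw [← PySem.Set.update_map_eq_foldl_add l (fun x => x.2.2) ([] : PySem.Set String)]
  apply List.map_congr_left
  intro k hk
  rw [pvGetDF l PySem.Dict.empty k]
  simp only [PySem.Dict.contains_empty, if_false, Bool.false_eq_true]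
  have hex : ∃ x ∈ l, x.2.2 = k := by
    rw [PySem.Set.update_map_eq_foldl_add] at hk
    rcases (PySem.Set.mem_foldl_add l (fun x => x.2.2) [] k).mp hk with h | ⟨b, hb, hkb⟩
    · simp at h
    · exact ⟨b, hb, hkb.symm⟩
  have hsome : (l.find? (fun x => x.2.2 == k)).isSome := by
    rw [List.find?_isSome]
    rcases hex with ⟨x, hx, hxk⟩
    exact ⟨x, hx, by simp [hxk]⟩
  rcases Option.isSome_iff_exists.mp hsome with ⟨x, hfx⟩
  rw [hfx]
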